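-- pv_equiv track=rewrite | github.com/rajen-shres/cobalt | organisations/views/club_menu_tabs/import_data.py | state_from_postcode
-- ===== SOURCE A (Python) =====
-- POSTCODE_RANGES = [
--     (200, 221, "ACT"),
--     (800, 899, "NT"),
--     (1000, 1999, "NSW"),
--     (2600, 2617, "ACT"),
--     (2900, 2906, "ACT"),
--     (2913, 2914, "ACT"),
--     (2000, 2899, "NSW"),
--     (3586, 3586, "NSW"),
--     (3644, 3644, "NSW"),
--     (3707, 3707, "NSW"),
--     (3000, 3999, "VIC"),
--     (4000, 4999, "QLD"),
--     (5000, 5999, "SA"),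
--     (6000, 6999, "WA"),
--     (7000, 7999, "TAS"),
--     (8000, 8999, "VIC"),
--     (9000, 9999, "QLD"),
-- ]
--
-- def state_from_postcode(postcode):
--     """Returns the three leter Australian state string for a given postcode
--
--     Args:
--         postcode (str): some postcode string
--
--     Returns:
--         str: state string or None
--     """
--
--     if not postcode:
--         return None
--
--     try:
--         pc_int = int(postcode)
--     except ValueError:
--         return None
--
--     for low, high, state_str in POSTCODE_RANGES:
--         if low <= pc_int <= high:
--             return state_str
--
--     return None
-- ===== SOURCE B (Python) =====
-- def state_from_postcode(postcode):
--     """Same result as A, but by arithmetic on the postcode instead of scanning ranges."""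
--     if not postcode:
--         return None
--     try:
--         pc = int(postcode)
--     except ValueError:
--         return None
--     if 200 <= pc <= 221 or 2600 <= pc <= 2617 or 2900 <= pc <= 2906 or 2913 <= pc <= 2914:
--         return "ACT"
--     if 800 <= pc <= 899:
--         return "NT"
--     if 1000 <= pc <= 2899 or pc in (3586, 3644, 3707):
--         return "NSW"
--     if 3000 <= pc <= 9999:
--         return ["VIC", "QLD", "SA", "WA", "TAS", "VIC", "QLD"][pc // 1000 - 3]
--     return None
-- ===== Notes on version B (the rewrite author's own statement) =====
-- stated objective: alternative
-- what changed: Replaces the sequential scan over POSTCODE_RANGES with direct arithmetic: a short if-chain of merged interval tests plus a thousands-digit table lookup for 3000-9999, so no range list is traversed.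
import Mathlib
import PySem

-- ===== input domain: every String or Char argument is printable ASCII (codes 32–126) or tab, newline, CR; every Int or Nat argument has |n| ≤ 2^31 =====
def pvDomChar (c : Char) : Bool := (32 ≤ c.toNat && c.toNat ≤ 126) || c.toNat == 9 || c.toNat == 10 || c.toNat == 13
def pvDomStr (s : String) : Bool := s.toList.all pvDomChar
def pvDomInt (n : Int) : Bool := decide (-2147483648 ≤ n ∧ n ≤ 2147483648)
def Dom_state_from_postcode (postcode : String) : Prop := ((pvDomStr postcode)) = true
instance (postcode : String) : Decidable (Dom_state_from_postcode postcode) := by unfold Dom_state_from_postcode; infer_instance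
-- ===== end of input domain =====

-- B replaces the sequential scan over 17 postcode ranges with direct arithmetic (merged
-- interval tests and a thousands-digit table); objective: alternative/idiomatic, same result.

-- ===== PORT A =====
def POSTCODE_RANGES : List (Int × Int × String) :=
  [(200, 221, "ACT"), (800, 899, "NT"), (1000, 1999, "NSW"), (2600, 2617, "ACT"),
   (2900, 2906, "ACT"), (2913, 2914, "ACT"), (2000, 2899, "NSW"), (3586, 3586, "NSW"),
   (3644, 3644, "NSW"), (3707, 3707, "NSW"), (3000, 3999, "VIC"), (4000, 4999, "QLD"),
   (5000, 5999, "SA"), (6000, 6999, "WA"), (7000, 7999, "TAS"), (8000, 8999, "VIC"),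
   (9000, 9999, "QLD")]

-- the 'for low, high, state_str in POSTCODE_RANGES' loop with its early return
def scanRanges : List (Int × Int × String) → Int → Option String
  | [], _ => none
  | (low, high, st) :: rest, pc =>
      if low ≤ pc ∧ pc ≤ high then some st else scanRanges rest pc

def state_from_postcode (postcode : String) : Option String :=
  if postcode = "" then none                      -- if not postcode
  else
    match PySem.Int.ofStr? postcode with          -- int(postcode), ValueError → None
    | none => none
    | some pc_int => scanRanges POSTCODE_RANGES pc_int

-- ===== PORT B =====
def stateTable : List String := ["VIC", "QLD", "SA", "WA", "TAS", "VIC", "QLD"]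

def state_from_postcode_alt (postcode : String) : Option String :=
  if postcode = "" then none
  else
    match PySem.Int.ofStr? postcode with
    | none => none
    | some pc =>
      if (200 ≤ pc ∧ pc ≤ 221) ∨ (2600 ≤ pc ∧ pc ≤ 2617) ∨ (2900 ≤ pc ∧ pc ≤ 2906) ∨
         (2913 ≤ pc ∧ pc ≤ 2914) then some "ACT"
      else if 800 ≤ pc ∧ pc ≤ 899 then some "NT"
      else if (1000 ≤ pc ∧ pc ≤ 2899) ∨ pc = 3586 ∨ pc = 3644 ∨ pc = 3707 then some "NSW"
      else if 3000 ≤ pc ∧ pc ≤ 9999 then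
        PySem.List.pyGet? stateTable (PySem.Int.floordiv pc 1000 - 3)  -- index always in range
      else none

-- ===== PRECONDITION & SPEC =====
def Spec_state_from_postcode (postcode : String) (out : Option String) : Prop := out = state_from_postcode_alt postcode
instance (postcode : String) (out : Option String) : Decidable (Spec_state_from_postcode postcode out) := by unfold Spec_state_from_postcode; infer_instance

-- ===== CLAIM (what is proved, stated in full; the proofs are below) =====
def Claim_equal_state_from_postcode : Prop := ∀ (postcode : String), Dom_state_from_postcode postcode → Spec_state_from_postcode postcode (state_from_postcode postcode)

-- ===== LEMMAS AND PROOFS =====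

theorem fdiv1000 (pc k : Int) (h1 : 1000 * k ≤ pc) (h2 : pc < 1000 * (k + 1)) :
    PySem.Int.floordiv pc 1000 = k := by
  rw [PySem.Int.floordiv_eq_iff_of_pos (by norm_num)]
  omega

theorem scanRanges_nil (pc : Int) : scanRanges [] pc = none := rfl

theorem scanRanges_cons (low high : Int) (st : String) (rest : List (Int × Int × String)) (pc : Int) :
    scanRanges ((low, high, st) :: rest) pc =
      if low ≤ pc ∧ pc ≤ high then some st else scanRanges rest pc := rfl

set_option maxHeartbeats 4000000 in
theorem core_eq (pc : Int) :
    scanRanges POSTCODE_RANGES pc =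
      (if (200 ≤ pc ∧ pc ≤ 221) ∨ (2600 ≤ pc ∧ pc ≤ 2617) ∨ (2900 ≤ pc ∧ pc ≤ 2906) ∨
          (2913 ≤ pc ∧ pc ≤ 2914) then some "ACT"
       else if 800 ≤ pc ∧ pc ≤ 899 then some "NT"
       else if (1000 ≤ pc ∧ pc ≤ 2899) ∨ pc = 3586 ∨ pc = 3644 ∨ pc = 3707 then some "NSW"
       else if 3000 ≤ pc ∧ pc ≤ 9999 then
         PySem.List.pyGet? stateTable (PySem.Int.floordiv pc 1000 - 3)
       else none) := by
  have tab : ∀ k : Int, 1000 * k ≤ pc → pc < 1000 * (k + 1) →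
      PySem.Int.floordiv pc 1000 - 3 = k - 3 := by
    intro k h1 h2; rw [fdiv1000 pc k h1 h2]
  rw [POSTCODE_RANGES]
  repeat rw [scanRanges_cons]
  rw [scanRanges_nil]
  by_cases h1 : 200 ≤ pc ∧ pc ≤ 221
  · rw [if_pos h1]; split_ifs <;> first | rfl | omega | (rw [tab 3 (by omega) (by omega)]; decide) | (rw [tab 4 (by omega) (by omega)]; decide) | (rw [tab 5 (by omega) (by omega)]; decide) | (rw [tab 6 (by omega) (by omega)]; decide) | (rw [tab 7 (by omega) (by omega)]; decide) | (rw [tab 8 (by omega) (by omega)]; decide) | (rw [tab 9 (by omega) (by omega)]; decide)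
  · rw [if_neg h1]
    by_cases h2 : 800 ≤ pc ∧ pc ≤ 899
    · rw [if_pos h2]; split_ifs <;> first | rfl | omega | (rw [tab 3 (by omega) (by omega)]; decide) | (rw [tab 4 (by omega) (by omega)]; decide) | (rw [tab 5 (by omega) (by omega)]; decide) | (rw [tab 6 (by omega) (by omega)]; decide) | (rw [tab 7 (by omega) (by omega)]; decide) | (rw [tab 8 (by omega) (by omega)]; decide) | (rw [tab 9 (by omega) (by omega)]; decide)
    · rw [if_neg h2]
      by_cases h3 : 1000 ≤ pc ∧ pc ≤ 1999
      · rw [if_pos h3]; split_ifs <;> first | rfl | omega | (rw [tab 3 (by omega) (by omega)]; decide) | (rw [tab 4 (by omega) (by omega)]; decide) | (rw [tab 5 (by omega) (by omega)]; decide) | (rw [tab 6 (by omega) (by omega)]; decide) | (rw [tab 7 (by omega) (by omega)]; decide) | (rw [tab 8 (by omega) (by omega)]; decide) | (rw [tab 9 (by omega) (by omega)]; decide)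
      · rw [if_neg h3]
        by_cases h4 : 2600 ≤ pc ∧ pc ≤ 2617
        · rw [if_pos h4]; split_ifs <;> first | rfl | omega | (rw [tab 3 (by omega) (by omega)]; decide) | (rw [tab 4 (by omega) (by omega)]; decide) | (rw [tab 5 (by omega) (by omega)]; decide) | (rw [tab 6 (by omega) (by omega)]; decide) | (rw [tab 7 (by omega) (by omega)]; decide) | (rw [tab 8 (by omega) (by omega)]; decide) | (rw [tab 9 (by omega) (by omega)]; decide)
        · rw [if_neg h4]
          by_cases h5 : 2900 ≤ pc ∧ pc ≤ 2906
          · rw [if_pos h5]; split_ifs <;> first | rfl | omega | (rw [tab 3 (by omega) (by omega)]; decide) | (rw [tab 4 (by omega) (by omega)]; decide) | (rw [tab 5 (by omega) (by omega)]; decide) | (rw [tab 6 (by omega) (by omega)]; decide) | (rw [tab 7 (by omega) (by omega)]; decide) | (rw [tab 8 (by omega) (by omega)]; decide) | (rw [tab 9 (by omega) (by omega)]; decide)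
          · rw [if_neg h5]
            by_cases h6 : 2913 ≤ pc ∧ pc ≤ 2914
            · rw [if_pos h6]; split_ifs <;> first | rfl | omega | (rw [tab 3 (by omega) (by omega)]; decide) | (rw [tab 4 (by omega) (by omega)]; decide) | (rw [tab 5 (by omega) (by omega)]; decide) | (rw [tab 6 (by omega) (by omega)]; decide) | (rw [tab 7 (by omega) (by omega)]; decide) | (rw [tab 8 (by omega) (by omega)]; decide) | (rw [tab 9 (by omega) (by omega)]; decide)
            · rw [if_neg h6]
              by_cases h7 : 2000 ≤ pc ∧ pc ≤ 2899
              · rw [if_pos h7]; split_ifs <;> first | rfl | omega | (rw [tab 3 (by omega) (by omega)]; decide) | (rw [tab 4 (by omega) (by omega)]; decide) | (rw [tab 5 (by omega) (by omega)]; decide) | (rw [tab 6 (by omega) (by omega)]; decide) | (rw [tab 7 (by omega) (by omega)]; decide) | (rw [tab 8 (by omega) (by omega)]; decide) | (rw [tab 9 (by omega) (by omega)]; decide)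
              · rw [if_neg h7]
                by_cases h8 : 3586 ≤ pc ∧ pc ≤ 3586
                · rw [if_pos h8]; split_ifs <;> first | rfl | omega | (rw [tab 3 (by omega) (by omega)]; decide) | (rw [tab 4 (by omega) (by omega)]; decide) | (rw [tab 5 (by omega) (by omega)]; decide) | (rw [tab 6 (by omega) (by omega)]; decide) | (rw [tab 7 (by omega) (by omega)]; decide) | (rw [tab 8 (by omega) (by omega)]; decide) | (rw [tab 9 (by omega) (by omega)]; decide)
                · rw [if_neg h8]
                  by_cases h9 : 3644 ≤ pc ∧ pc ≤ 3644
                  · rw [if_pos h9]; split_ifs <;> first | rfl | omega | (rw [tab 3 (by omega) (by omega)]; decide) | (rw [tab 4 (by omega) (by omega)]; decide) | (rw [tab 5 (by omega) (by omega)]; decide) | (rw [tab 6 (by omega) (by omega)]; decide) | (rw [tab 7 (by omega) (by omega)]; decide) | (rw [tab 8 (by omega) (by omega)]; decide) | (rw [tab 9 (by omega) (by omega)]; decide)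
                  · rw [if_neg h9]
                    by_cases h10 : 3707 ≤ pc ∧ pc ≤ 3707
                    · rw [if_pos h10]; split_ifs <;> first | rfl | omega | (rw [tab 3 (by omega) (by omega)]; decide) | (rw [tab 4 (by omega) (by omega)]; decide) | (rw [tab 5 (by omega) (by omega)]; decide) | (rw [tab 6 (by omega) (by omega)]; decide) | (rw [tab 7 (by omega) (by omega)]; decide) | (rw [tab 8 (by omega) (by omega)]; decide) | (rw [tab 9 (by omega) (by omega)]; decide)
                    · rw [if_neg h10]
                      by_cases h11 : 3000 ≤ pc ∧ pc ≤ 3999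
                      · rw [if_pos h11]; split_ifs <;> first | rfl | omega | (rw [tab 3 (by omega) (by omega)]; decide) | (rw [tab 4 (by omega) (by omega)]; decide) | (rw [tab 5 (by omega) (by omega)]; decide) | (rw [tab 6 (by omega) (by omega)]; decide) | (rw [tab 7 (by omega) (by omega)]; decide) | (rw [tab 8 (by omega) (by omega)]; decide) | (rw [tab 9 (by omega) (by omega)]; decide)
                      · rw [if_neg h11]
                        by_cases h12 : 4000 ≤ pc ∧ pc ≤ 4999
                        · rw [if_pos h12]; split_ifs <;> first | rfl | omega | (rw [tab 3 (by omega) (by omega)]; decide) | (rw [tab 4 (by omega) (by omega)]; decide) | (rw [tab 5 (by omega) (by omega)]; decide) | (rw [tab 6 (by omega) (by omega)]; decide) | (rw [tab 7 (by omega) (by omega)]; decide) | (rw [tab 8 (by omega) (by omega)]; decide) | (rw [tab 9 (by omega) (by omega)]; decide)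
                        · rw [if_neg h12]
                          by_cases h13 : 5000 ≤ pc ∧ pc ≤ 5999
                          · rw [if_pos h13]; split_ifs <;> first | rfl | omega | (rw [tab 3 (by omega) (by omega)]; decide) | (rw [tab 4 (by omega) (by omega)]; decide) | (rw [tab 5 (by omega) (by omega)]; decide) | (rw [tab 6 (by omega) (by omega)]; decide) | (rw [tab 7 (by omega) (by omega)]; decide) | (rw [tab 8 (by omega) (by omega)]; decide) | (rw [tab 9 (by omega) (by omega)]; decide)
                          · rw [if_neg h13]
                            by_cases h14 : 6000 ≤ pc ∧ pc ≤ 6999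
                            · rw [if_pos h14]; split_ifs <;> first | rfl | omega | (rw [tab 3 (by omega) (by omega)]; decide) | (rw [tab 4 (by omega) (by omega)]; decide) | (rw [tab 5 (by omega) (by omega)]; decide) | (rw [tab 6 (by omega) (by omega)]; decide) | (rw [tab 7 (by omega) (by omega)]; decide) | (rw [tab 8 (by omega) (by omega)]; decide) | (rw [tab 9 (by omega) (by omega)]; decide)
                            · rw [if_neg h14]
                              by_cases h15 : 7000 ≤ pc ∧ pc ≤ 7999
                              · rw [if_pos h15]; split_ifs <;> first | rfl | omega | (rw [tab 3 (by omega) (by omega)]; decide) | (rw [tab 4 (by omega) (by omega)]; decide) | (rw [tab 5 (by omega) (by omega)]; decide) | (rw [tab 6 (by omega) (by omega)]; decide) | (rw [tab 7 (by omega) (by omega)]; decide) | (rw [tab 8 (by omega) (by omega)]; decide) | (rw [tab 9 (by omega) (by omega)]; decide)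
                              · rw [if_neg h15]
                                by_cases h16 : 8000 ≤ pc ∧ pc ≤ 8999
                                · rw [if_pos h16]; split_ifs <;> first | rfl | omega | (rw [tab 3 (by omega) (by omega)]; decide) | (rw [tab 4 (by omega) (by omega)]; decide) | (rw [tab 5 (by omega) (by omega)]; decide) | (rw [tab 6 (by omega) (by omega)]; decide) | (rw [tab 7 (by omega) (by omega)]; decide) | (rw [tab 8 (by omega) (by omega)]; decide) | (rw [tab 9 (by omega) (by omega)]; decide)
                                · rw [if_neg h16]
                                  by_cases h17 : 9000 ≤ pc ∧ pc ≤ 9999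
                                  · rw [if_pos h17]; split_ifs <;> first | rfl | omega | (rw [tab 3 (by omega) (by omega)]; decide) | (rw [tab 4 (by omega) (by omega)]; decide) | (rw [tab 5 (by omega) (by omega)]; decide) | (rw [tab 6 (by omega) (by omega)]; decide) | (rw [tab 7 (by omega) (by omega)]; decide) | (rw [tab 8 (by omega) (by omega)]; decide) | (rw [tab 9 (by omega) (by omega)]; decide)
                                  · rw [if_neg h17]
                                    split_ifs <;> first | rfl | omega | (rw [tab 3 (by omega) (by omega)]; decide) | (rw [tab 4 (by omega) (by omega)]; decide) | (rw [tab 5 (by omega) (by omega)]; decide) | (rw [tab 6 (by omega) (by omega)]; decide) | (rw [tab 7 (by omega) (by omega)]; decide) | (rw [tab 8 (by omega) (by omega)]; decide) | (rw [tab 9 (by omega) (by omega)]; decide)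

-- ===== VERDICT (by name: the statement is the Claim_ definition above) =====
theorem state_from_postcode_spec : Claim_equal_state_from_postcode := by
  intro postcode _
  unfold Spec_state_from_postcode state_from_postcode state_from_postcode_alt
  by_cases he : postcode = ""
  · simp [he]
  · simp only [he, if_false]
    cases PySem.Int.ofStr? postcode with
    | none => rfl
    | some pc => exact core_eq pc
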